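-- pv_equiv track=rewrite | github.com/cfe-lab/proviral | cfeproviral/primer_finder.py | handle_x
-- ===== SOURCE A (Python) =====
-- def handle_x(sequence):
--     length = len(sequence)
--     midpoint = length / 2
--     x_positions = [i for i, j in enumerate(sequence) if j == 'X']
--     try:
--         rightmost_x = max([x for x in x_positions if x <= midpoint])
--     except ValueError:
--         rightmost_x = None
--     try:
--         leftmost_x = min([x for x in x_positions if x > midpoint])
--     except ValueError:
--         leftmost_x = None
--     if rightmost_x is not None and leftmost_x is not None:
--         sequence = sequence[rightmost_x + 1:leftmost_x]
--     elif rightmost_x is not None: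
--         sequence = sequence[rightmost_x + 1:]
--     elif leftmost_x is not None:
--         sequence = sequence[:leftmost_x]
--     return sequence
-- ===== SOURCE B (Python) =====
-- def handle_x(sequence):
--     # Single left-to-right pass with an accumulator: every 'X' in the left half
--     # (2*i <= len) wipes what was collected so far, the first 'X' past the
--     # midpoint stops the scan; everything else is collected.
--     n = len(sequence)
--     out = []
--     for i, ch in enumerate(sequence):
--         if ch == 'X':
--             if 2 * i <= n:
--                 out.clear()
--             else:
--                 break
--         else:
--             out.append(ch)
--     return ''.join(out)
-- ===== Notes on version B (the rewrite author's own statement) =====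
-- stated objective: alternative
-- what changed: B replaces A's staged passes (build the X-position list, max over the left-half filter, min over the right-half filter, then slice) by a single streaming pass with an accumulator that is wiped at each left-half 'X' and stopped at the first right-half 'X'.
import Mathlib
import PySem

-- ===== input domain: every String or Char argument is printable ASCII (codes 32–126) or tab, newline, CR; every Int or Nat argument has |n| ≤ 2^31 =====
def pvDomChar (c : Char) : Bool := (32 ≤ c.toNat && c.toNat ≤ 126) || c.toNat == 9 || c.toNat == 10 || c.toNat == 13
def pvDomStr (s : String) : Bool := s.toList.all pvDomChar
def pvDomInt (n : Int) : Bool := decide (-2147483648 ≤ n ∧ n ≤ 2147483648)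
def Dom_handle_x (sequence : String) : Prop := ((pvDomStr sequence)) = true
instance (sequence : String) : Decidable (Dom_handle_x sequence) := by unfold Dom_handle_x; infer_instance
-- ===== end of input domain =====

-- B replaces A's staged passes (X-position list, filtered max, filtered min, slice)
-- by one streaming pass whose accumulator is wiped at each left-half 'X' and
-- stopped at the first right-half 'X' (objective: alternative).


-- ===== PORT A =====
-- midpoint = length / 2 is a Python float; for an integer position x the tests
-- 'x <= midpoint' / 'x > midpoint' are exactly '2*x <= length' / '2*x > length'
-- (exact: length/2 is an exact float and the int/float comparison is exact here),
-- and that is how they are ported.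
def handle_x (sequence : String) : String :=
  let length : Int := PySem.Str.len sequence
  let x_positions : List Int :=
    (PySem.List.enumerate sequence.toList 0).filterMap
      (fun p => if p.2 = 'X' then some p.1 else none)
  let rightmost_x : Option Int :=
    PySem.List.max? (x_positions.filter (fun x => 2 * x ≤ length)) (fun y => y)
  let leftmost_x : Option Int :=
    PySem.List.min? (x_positions.filter (fun x => 2 * x > length)) (fun y => y)
  match rightmost_x, leftmost_x with
  | some r, some l => PySem.Str.slice sequence (some (r + 1)) (some l)
  | some r, none   => PySem.Str.slice sequence (some (r + 1)) none
  | none,   some l => PySem.Str.slice sequence none (some l)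
  | none,   none   => sequence

-- ===== PORT B =====
-- the loop body of Source B: wipe the accumulator at a left-half 'X', stop at a
-- right-half 'X', otherwise collect the character
def handle_x_altGo (n : Int) : List (Int × Char) → List Char → List Char
  | [], out => out
  | (i, ch) :: rest, out =>
    if ch = 'X' then
      if 2 * i ≤ n then handle_x_altGo n rest []
      else out
    else handle_x_altGo n rest (out ++ [ch])

def handle_x_alt (sequence : String) : String :=
  let n : Int := PySem.Str.len sequence
  String.ofList (handle_x_altGo n (PySem.List.enumerate sequence.toList 0) [])

-- ===== PRECONDITION & SPEC =====
def Spec_handle_x (sequence : String) (out : String) : Prop := out = handle_x_alt sequence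
instance (sequence : String) (out : String) : Decidable (Spec_handle_x sequence out) := by unfold Spec_handle_x; infer_instance

-- ===== CLAIM (what is proved, stated in full; the proofs are below) =====
def Claim_equal_handle_x : Prop := ∀ (sequence : String), Dom_handle_x sequence → Spec_handle_x sequence (handle_x sequence)

-- ===== LEMMAS AND PROOFS =====

-- membership in A's x_positions list
theorem mem_xpos (cs : List Char) (x : Int) :
    x ∈ (PySem.List.enumerate cs 0).filterMap
        (fun p => if p.2 = 'X' then some p.1 else none) ↔
      ∃ k : Nat, cs[k]? = some 'X' ∧ x = (k : Int) := by
  simp only [List.mem_filterMap]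
  constructor
  · rintro ⟨p, hp, hif⟩
    rw [PySem.List.mem_enumerate_iff] at hp
    obtain ⟨k, hk, rfl⟩ := hp
    by_cases hX : cs[k] = 'X'
    · simp [hX] at hif
      exact ⟨k, by simp [List.getElem?_eq_getElem hk, hX], by omega⟩
    · simp [hX] at hif
  · rintro ⟨k, hX, rfl⟩
    have hk : k < cs.length := by
      by_contra hk
      have hnone : cs[k]? = none := List.getElem?_eq_none (by omega)
      rw [hnone] at hX
      simp at hX
    refine ⟨((k : Int), cs[k]), ?_, ?_⟩
    · rw [PySem.List.mem_enumerate_iff]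
      exact ⟨k, hk, by simp⟩
    · have : cs[k] = 'X' := by
        have hg := List.getElem?_eq_getElem hk
        rw [hg] at hX; simpa using hX
      simp [this]

-- takeWhile (≠ 'X') stops exactly at the first 'X'
theorem takeWhile_eq_take_of_firstX :
    ∀ (l : List Char) (m : Nat), m < l.length → l[m]? = some 'X' →
      (∀ j : Nat, j < m → l[j]? ≠ some 'X') →
      l.takeWhile (fun c => !(c == 'X')) = l.take m := by
  intro l
  induction l with
  | nil => intro m hm _ _; simp at hm
  | cons c rest ih =>
    intro m hm hX hpre
    cases m with
    | zero =>
      simp at hX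
      simp [List.takeWhile_cons, hX]
    | succ m' =>
      have hc : c ≠ 'X' := by
        intro hc
        exact hpre 0 (by omega) (by simp [hc])
      simp only [List.takeWhile_cons, List.take_succ_cons]
      rw [if_pos (by simp [hc])]
      congr 1
      exact ih m' (by simpa using hm) (by simpa using hX)
        (fun j hj => by
          have := hpre (j + 1) (by omega)
          simpa using this)

-- takeWhile (≠ 'X') keeps everything when there is no 'X'
theorem takeWhile_eq_self_of_noX :
    ∀ (l : List Char), (∀ j : Nat, l[j]? ≠ some 'X') →
      l.takeWhile (fun c => !(c == 'X')) = l := by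
  intro l
  induction l with
  | nil => intro _; simp
  | cons c rest ih =>
    intro h
    have hc : c ≠ 'X' := by
      intro hc
      exact h 0 (by simp [hc])
    simp only [List.takeWhile_cons]
    rw [if_pos (by simp [hc])]
    rw [ih (fun j => by have := h (j + 1); simpa using this)]

-- the streaming loop when no remaining 'X' lies in the left half:
-- it appends characters until the first 'X' (which stops it) or the end
theorem altGo_no_left (n : Int) :
    ∀ (cs : List Char) (s : Int) (acc : List Char),
      (∀ j : Nat, cs[j]? = some 'X' → ¬ (2 * (s + (j : Int)) ≤ n)) →
      handle_x_altGo n (PySem.List.enumerate cs s) acc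
        = acc ++ cs.takeWhile (fun c => !(c == 'X')) := by
  intro cs
  induction cs with
  | nil => intro s acc _; simp [PySem.List.enumerate_nil, handle_x_altGo]
  | cons c rest ih =>
    intro s acc h
    rw [PySem.List.enumerate_cons]
    by_cases hc : c = 'X'
    · have h0 := h 0 (by simp [hc])
      simp only [handle_x_altGo]
      rw [if_pos hc, if_neg (by simpa using h0)]
      simp [List.takeWhile_cons, hc]
    · simp only [handle_x_altGo]
      rw [if_neg hc]
      rw [ih (s + 1) (acc ++ [c])
        (fun j hj => by
          have := h (j + 1) (by simpa using hj)
          intro hle; exact this (by push_cast at hle ⊢; omega))]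
      simp only [List.takeWhile_cons]
      rw [if_pos (by simp [hc])]
      simp

-- the streaming loop when r is the LAST left-half 'X': whatever was collected
-- is wiped there, and the answer is the stretch after r up to the next 'X'
theorem altGo_left (n : Int) :
    ∀ (cs : List Char) (s : Int) (acc : List Char) (r : Nat),
      cs[r]? = some 'X' → 2 * (s + (r : Int)) ≤ n →
      (∀ j : Nat, r < j → cs[j]? = some 'X' → ¬ (2 * (s + (j : Int)) ≤ n)) →
      handle_x_altGo n (PySem.List.enumerate cs s) acc
        = (cs.drop (r + 1)).takeWhile (fun c => !(c == 'X')) := by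
  intro cs
  induction cs with
  | nil => intro s acc r hr _ _; simp at hr
  | cons c rest ih =>
    intro s acc r hr hle hmax
    rw [PySem.List.enumerate_cons]
    cases r with
    | zero =>
      simp at hr
      simp only [handle_x_altGo]
      rw [if_pos hr, if_pos (by simpa using hle)]
      rw [altGo_no_left n rest (s + 1) []
        (fun j hj => by
          have := hmax (j + 1) (by omega) (by simpa using hj)
          intro hle'; exact this (by push_cast at hle' ⊢; omega))]
      simp
    | succ r' =>
      by_cases hc : c = 'X'
      · simp only [handle_x_altGo]
        rw [if_pos hc, if_pos (by push_cast at hle ⊢; omega)]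
        rw [ih (s + 1) [] r' (by simpa using hr)
          (by push_cast at hle ⊢; omega)
          (fun j hj hX => by
            have := hmax (j + 1) (by omega) (by simpa using hX)
            intro hle'; exact this (by push_cast at hle' ⊢; omega))]
        simp
      · simp only [handle_x_altGo]
        rw [if_neg hc]
        rw [ih (s + 1) (acc ++ [c]) r' (by simpa using hr)
          (by push_cast at hle ⊢; omega)
          (fun j hj hX => by
            have := hmax (j + 1) (by omega) (by simpa using hX)
            intro hle'; exact this (by push_cast at hle' ⊢; omega))]
        simp

-- positions cannot be 'X' beyond the end
theorem getElem?_X_lt (cs : List Char) (k : Nat) (h : cs[k]? = some 'X') :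
    k < cs.length := by
  by_contra hk
  rw [List.getElem?_eq_none (by omega)] at h
  simp at h

-- the two ports agree
theorem handle_x_eq_alt (sequence : String) : handle_x sequence = handle_x_alt sequence := by
  classical
  refine String.toList_inj.mp ?_
  unfold handle_x handle_x_alt
  dsimp only
  have hlen : PySem.Str.len sequence = ((sequence.toList.length : Nat) : Int) := by simp
  rw [hlen]
  set cs := sequence.toList with hcs
  set n : Int := (cs.length : Int) with hn
  set L := (((PySem.List.enumerate cs 0).filterMap
      (fun p => if p.2 = 'X' then some p.1 else none)).filter
      (fun x => 2 * x ≤ n)) with hL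
  set R := (((PySem.List.enumerate cs 0).filterMap
      (fun p => if p.2 = 'X' then some p.1 else none)).filter
      (fun x => 2 * x > n)) with hR
  have memL : ∀ x : Int, x ∈ L ↔
      ∃ k : Nat, cs[k]? = some 'X' ∧ 2 * (k : Int) ≤ n ∧ x = (k : Int) := by
    intro x
    rw [hL, List.mem_filter, mem_xpos]
    constructor
    · rintro ⟨⟨k, hX, rfl⟩, hle⟩
      simp only [decide_eq_true_eq] at hle
      exact ⟨k, hX, hle, rfl⟩
    · rintro ⟨k, hX, hle, rfl⟩
      exact ⟨⟨k, hX, rfl⟩, by simpa using hle⟩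
  have memR : ∀ x : Int, x ∈ R ↔
      ∃ k : Nat, cs[k]? = some 'X' ∧ 2 * (k : Int) > n ∧ x = (k : Int) := by
    intro x
    rw [hR, List.mem_filter, mem_xpos]
    constructor
    · rintro ⟨⟨k, hX, rfl⟩, hgt⟩
      simp only [decide_eq_true_eq] at hgt
      exact ⟨k, hX, hgt, rfl⟩
    · rintro ⟨k, hX, hgt, rfl⟩
      exact ⟨⟨k, hX, rfl⟩, by simpa using hgt⟩
  rcases hmax : PySem.List.max? L (fun y => y) with _ | vr <;>
    rcases hmin : PySem.List.min? R (fun y => y) with _ | vl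
  · -- no X at all
    dsimp only
    have hLnil := (PySem.List.max?_eq_none_iff _ _).mp hmax
    have hRnil := (PySem.List.min?_eq_none_iff _ _).mp hmin
    have hnoX : ∀ j : Nat, cs[j]? ≠ some 'X' := by
      intro j hX
      by_cases h : 2 * (j : Int) ≤ n
      · have : ((j : Int)) ∈ L := (memL _).mpr ⟨j, hX, h, rfl⟩
        rw [hLnil] at this; simp at this
      · have : ((j : Int)) ∈ R := (memR _).mpr ⟨j, hX, by omega, rfl⟩
        rw [hRnil] at this; simp at this
    rw [altGo_no_left n cs 0 [] (fun j hj _ => hnoX j hj)]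
    rw [takeWhile_eq_self_of_noX cs hnoX]
    simp [hcs]
  · -- only a right-half X
    dsimp only
    have hLnil := (PySem.List.max?_eq_none_iff _ _).mp hmax
    obtain ⟨kl, hXl, hgtl, rfl⟩ := (memR vl).mp (PySem.List.min?_mem hmin)
    have hminl : ∀ k : Nat, cs[k]? = some 'X' → 2 * (k : Int) > n → kl ≤ k := by
      intro k hX hgt
      have := PySem.List.min?_isMin hmin ((k : Int)) ((memR _).mpr ⟨k, hX, hgt, rfl⟩)
      exact_mod_cast this
    have hnoleft : ∀ j : Nat, cs[j]? = some 'X' → ¬ (2 * ((0 : Int) + (j : Int)) ≤ n) := by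
      intro j hX hle
      have : ((j : Int)) ∈ L := (memL _).mpr ⟨j, hX, by omega, rfl⟩
      rw [hLnil] at this; simp at this
    rw [altGo_no_left n cs 0 [] hnoleft]
    rw [takeWhile_eq_take_of_firstX cs kl (getElem?_X_lt cs kl hXl) hXl
      (fun j hj hX => by
        by_cases h : 2 * (j : Int) ≤ n
        · exact hnoleft j hX (by omega)
        · have := hminl j hX (by omega); omega)]
    rw [PySem.Str.toList_slice, PySem.Chars.slice_eq_listSlice, ← hcs,
      PySem.List.slice_to_natCast]
    simp
  · -- only a left-half X
    dsimp only
    have hRnil := (PySem.List.min?_eq_none_iff _ _).mp hmin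
    obtain ⟨kr, hXr, hler, rfl⟩ := (memL vr).mp (PySem.List.max?_mem hmax)
    have hmaxr : ∀ k : Nat, cs[k]? = some 'X' → 2 * (k : Int) ≤ n → k ≤ kr := by
      intro k hX hle
      have := PySem.List.max?_isMax hmax ((k : Int)) ((memL _).mpr ⟨k, hX, hle, rfl⟩)
      exact_mod_cast this
    have hnoright : ∀ k : Nat, cs[k]? = some 'X' → ¬ (2 * (k : Int) > n) := by
      intro k hX hgt
      have : ((k : Int)) ∈ R := (memR _).mpr ⟨k, hX, hgt, rfl⟩
      rw [hRnil] at this; simp at this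
    rw [altGo_left n cs 0 [] kr hXr (by omega)
      (fun j hj hX hle => by
        have := hmaxr j hX (by omega); omega)]
    rw [takeWhile_eq_self_of_noX (cs.drop (kr + 1))
      (fun j hX => by
        rw [List.getElem?_drop] at hX
        by_cases h : 2 * ((kr + 1 + j : Nat) : Int) ≤ n
        · have := hmaxr _ hX h; omega
        · exact hnoright _ hX (by omega))]
    rw [PySem.Str.toList_slice, PySem.Chars.slice_eq_listSlice, ← hcs]
    have h1 : ((kr : Int)) + 1 = (((kr + 1 : Nat)) : Int) := by push_cast; ring
    rw [h1, PySem.List.slice_from_natCast]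
    simp
  · -- X on both sides
    dsimp only
    obtain ⟨kr, hXr, hler, rfl⟩ := (memL vr).mp (PySem.List.max?_mem hmax)
    obtain ⟨kl, hXl, hgtl, rfl⟩ := (memR vl).mp (PySem.List.min?_mem hmin)
    have hmaxr : ∀ k : Nat, cs[k]? = some 'X' → 2 * (k : Int) ≤ n → k ≤ kr := by
      intro k hX hle
      have := PySem.List.max?_isMax hmax ((k : Int)) ((memL _).mpr ⟨k, hX, hle, rfl⟩)
      exact_mod_cast this
    have hminl : ∀ k : Nat, cs[k]? = some 'X' → 2 * (k : Int) > n → kl ≤ k := by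
      intro k hX hgt
      have := PySem.List.min?_isMin hmin ((k : Int)) ((memR _).mpr ⟨k, hX, hgt, rfl⟩)
      exact_mod_cast this
    have hrk : kr < kl := by
      have : 2 * (kr : Int) ≤ n := hler
      have : 2 * (kl : Int) > n := hgtl
      omega
    rw [altGo_left n cs 0 [] kr hXr (by omega)
      (fun j hj hX hle => by
        have := hmaxr j hX (by omega); omega)]
    rw [takeWhile_eq_take_of_firstX (cs.drop (kr + 1)) (kl - (kr + 1))
      (by
        have := getElem?_X_lt cs kl hXl
        simp [hcs] at this ⊢
        omega)
      (by
        rw [List.getElem?_drop]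
        have : kr + 1 + (kl - (kr + 1)) = kl := by omega
        rw [this]; exact hXl)
      (fun j hj hX => by
        rw [List.getElem?_drop] at hX
        by_cases h : 2 * ((kr + 1 + j : Nat) : Int) ≤ n
        · have := hmaxr _ hX h; omega
        · have := hminl _ hX (by omega); omega)]
    rw [PySem.Str.toList_slice, PySem.Chars.slice_eq_listSlice, ← hcs]
    have h1 : ((kr : Int)) + 1 = (((kr + 1 : Nat)) : Int) := by push_cast; ring
    rw [h1, PySem.List.slice_natCast]
    simp

-- ===== VERDICT (by name: the statement is the Claim_ definition above) =====
theorem handle_x_spec : Claim_equal_handle_x := by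
  intro sequence _
  unfold Spec_handle_x
  exact handle_x_eq_alt sequence
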